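-- pv_equiv track=rewrite | github.com/mdiller/dotabase-builder | valve2json.py | uncommentkvfile
-- ===== SOURCE A (Python) =====
-- def uncommentkvfile(text):
-- 	in_value = False
-- 	in_comment = False
-- 	result = ""
--
-- 	for i in range(len(text)):
-- 		if in_comment:
-- 			if text[i] == "\n":
-- 				in_comment = False
-- 				result += text[i]
-- 			continue
--
-- 		if text[i] == '"':
-- 			in_value = not in_value
-- 			result += text[i]
-- 			continue
--
-- 		if (not in_value) and text[i] == "/":
-- 			in_comment = True
-- 			continue
--
-- 		result += text[i]
--
-- 	return result
-- ===== SOURCE B (Python) =====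
-- def uncommentkvfile(text):
-- 	out = []
-- 	i = 0
-- 	n = len(text)
-- 	while i < n:
-- 		c = text[i]
-- 		if c == '"':
-- 			j = text.find('"', i + 1)
-- 			if j == -1:
-- 				out.append(text[i:])
-- 				i = n
-- 			else:
-- 				out.append(text[i:j + 1])
-- 				i = j + 1
-- 		elif c == '/':
-- 			j = text.find('\n', i + 1)
-- 			if j == -1:
-- 				i = n
-- 			else:
-- 				out.append('\n')
-- 				i = j + 1
-- 		else:
-- 			out.append(c)
-- 			i += 1
-- 	return ''.join(out)
-- ===== Notes on version B (the rewrite author's own statement) =====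
-- stated objective: idiomatic
-- what changed: Replaced the per-character in_value/in_comment flag automaton by a segment scanner that consumes a whole quoted string (via str.find) or a whole comment-up-to-newline in one step and joins the collected chunks.
import Mathlib
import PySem

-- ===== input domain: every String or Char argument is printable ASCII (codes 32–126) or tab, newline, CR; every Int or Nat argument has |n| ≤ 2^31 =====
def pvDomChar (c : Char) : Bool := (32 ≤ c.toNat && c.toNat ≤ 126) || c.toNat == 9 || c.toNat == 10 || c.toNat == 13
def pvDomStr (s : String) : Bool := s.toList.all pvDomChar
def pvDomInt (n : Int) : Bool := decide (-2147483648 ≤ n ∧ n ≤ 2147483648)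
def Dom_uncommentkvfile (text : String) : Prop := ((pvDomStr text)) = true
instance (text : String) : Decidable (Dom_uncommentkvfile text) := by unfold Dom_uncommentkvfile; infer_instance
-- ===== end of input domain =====

-- B replaces A's per-character in_value/in_comment flag automaton by a segment scanner that
-- consumes a whole quoted string or a whole comment-to-newline in one step (objective: idiomatic).

-- ===== PORT A =====
-- state = (in_value, in_comment, result); one step per character, branches in A's order
def uaStep (st : Bool × Bool × List Char) (c : Char) : Bool × Bool × List Char :=
  match st with
  | (inv, inc, res) =>
    if inc then
      if c = '\n' then (inv, false, res ++ [c]) else (inv, inc, res)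
    else if c = '"' then (!inv, inc, res ++ [c])
    else if inv = false ∧ c = '/' then (inv, true, res)
    else (inv, inc, res ++ [c])

def uncommentkvfile (text : String) : String :=
  String.mk (text.toList.foldl uaStep (false, false, [])).2.2

-- ===== PORT B =====
-- Source B's find-slice chunk consumption, ported as takeWhile/dropWhile on the char list
def ubGo : List Char → List Char
  | [] => []
  | c :: rest =>
    if c = '"' then
      match _h : rest.dropWhile (· ≠ '"') with
      | [] => c :: rest
      | q :: r => c :: (rest.takeWhile (· ≠ '"') ++ [q] ++ ubGo r)
    else if c = '/' then
      match _h : rest.dropWhile (· ≠ '\n') with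
      | [] => []
      | nl :: r => nl :: ubGo r
    else c :: ubGo rest
termination_by l => l.length
decreasing_by
  all_goals simp only [List.length_cons]
  · have h1 := List.length_dropWhile_le (fun x => decide (x ≠ '"')) rest
    rw [_h] at h1; simp at h1; omega
  · have h1 := List.length_dropWhile_le (fun x => decide (x ≠ '\n')) rest
    rw [_h] at h1; simp at h1; omega
  · omega

def uncommentkvfile_alt (text : String) : String :=
  String.mk (ubGo text.toList)

-- ===== PRECONDITION & SPEC =====
def Spec_uncommentkvfile (text : String) (out : String) : Prop := out = uncommentkvfile_alt text
instance (text : String) (out : String) : Decidable (Spec_uncommentkvfile text out) := by unfold Spec_uncommentkvfile; infer_instance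

-- ===== CLAIM (what is proved, stated in full; the proofs are below) =====
def Claim_equal_uncommentkvfile : Prop := ∀ (text : String), Dom_uncommentkvfile text → Spec_uncommentkvfile text (uncommentkvfile text)

-- ===== LEMMAS AND PROOFS =====

-- A in the comment state skips to the next newline (inclusive)
theorem ua_comment (l : List Char) (inv : Bool) (res : List Char) :
    l.foldl uaStep (inv, true, res) =
      match l.dropWhile (· ≠ '\n') with
      | [] => (inv, true, res)
      | nl :: r => r.foldl uaStep (inv, false, res ++ [nl]) := by
  induction l generalizing res with
  | nil => simp
  | cons x xs ih =>
    by_cases hx : x = '\n'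
    · subst hx; simp [uaStep, List.dropWhile]
    · simp [uaStep, List.dropWhile, hx, ih]

-- A in the in-value state copies everything up to and including the next quote
theorem ua_quote (l : List Char) (res : List Char) :
    l.foldl uaStep (true, false, res) =
      match l.dropWhile (· ≠ '"') with
      | [] => (true, false, res ++ l.takeWhile (· ≠ '"'))
      | q :: r => r.foldl uaStep (false, false, res ++ l.takeWhile (· ≠ '"') ++ [q]) := by
  induction l generalizing res with
  | nil => simp
  | cons x xs ih =>
    by_cases hx : x = '"'
    · subst hx; simp [uaStep, List.dropWhile, List.takeWhile]
    · simp only [List.foldl_cons, uaStep, List.dropWhile, List.takeWhile, hx]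
      simp [hx, ih]

-- branch equations for ubGo (resolve its match-with-equation against a dropWhile hypothesis)
theorem ubGo_quote_nil (rest : List Char) (hd : rest.dropWhile (· ≠ '"') = []) :
    ubGo ('"' :: rest) = '"' :: rest := by
  rw [ubGo]
  split
  · split
    · rfl
    · next q r heq => rw [hd] at heq; cases heq
  · next hne => exact absurd rfl hne

theorem ubGo_quote_cons (rest : List Char) (q : Char) (r : List Char)
    (hd : rest.dropWhile (· ≠ '"') = q :: r) :
    ubGo ('"' :: rest) = '"' :: (rest.takeWhile (· ≠ '"') ++ [q] ++ ubGo r) := by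
  rw [ubGo]
  split
  · split
    · next heq => rw [hd] at heq; cases heq
    · next q' r' heq => rw [hd] at heq; cases heq; rfl
  · next hne => exact absurd rfl hne

theorem ubGo_comment_nil (rest : List Char) (hd : rest.dropWhile (· ≠ '\n') = []) :
    ubGo ('/' :: rest) = [] := by
  rw [ubGo]
  split
  · next h1 => exact absurd h1 (by decide)
  · split
    · split
      · rfl
      · next nl r heq => rw [hd] at heq; cases heq
    · next h2 => exact absurd rfl h2

theorem ubGo_comment_cons (rest : List Char) (nl : Char) (r : List Char)
    (hd : rest.dropWhile (· ≠ '\n') = nl :: r) :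
    ubGo ('/' :: rest) = nl :: ubGo r := by
  rw [ubGo]
  split
  · next h1 => exact absurd h1 (by decide)
  · split
    · split
      · next heq => rw [hd] at heq; cases heq
      · next nl' r' heq => rw [hd] at heq; cases heq; rfl
    · next h2 => exact absurd rfl h2

theorem ubGo_other (c : Char) (rest : List Char) (hc : ¬ c = '"') (hs : ¬ c = '/') :
    ubGo (c :: rest) = c :: ubGo rest := by
  rw [ubGo]; simp [hc, hs]

-- main correspondence: A's fold from the neutral state appends exactly B's output
theorem ua_main_aux (n : Nat) : ∀ (l : List Char), l.length ≤ n → ∀ (res : List Char),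
    (l.foldl uaStep (false, false, res)).2.2 = res ++ ubGo l := by
  induction n with
  | zero =>
    intro l hl res
    have hnil : l = [] := List.eq_nil_of_length_eq_zero (Nat.le_zero.mp hl)
    subst hnil; simp [ubGo]
  | succ n ih =>
    intro l hl res
    match l with
    | [] => simp [ubGo]
    | c :: rest =>
      have hrest : rest.length ≤ n := by simp [List.length_cons] at hl; omega
      by_cases hc : c = '"'
      · subst hc
        have hstep : uaStep (false, false, res) '"' = (true, false, res ++ ['"']) := by
          simp [uaStep]
        rw [List.foldl_cons, hstep, ua_quote]
        rcases hd : rest.dropWhile (· ≠ '"') with _ | ⟨q, r⟩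
        · have ht : rest.takeWhile (· ≠ '"') = rest := by
            have h2 := rest.takeWhile_append_dropWhile (p := (· ≠ '"'))
            rw [hd, List.append_nil] at h2; exact h2
          rw [ubGo_quote_nil rest hd]
          rw [ht]
          simp
        · have hr : r.length ≤ n := by
            have h1 := List.length_dropWhile_le (fun x => decide (x ≠ '"')) rest
            rw [hd] at h1; simp at h1; omega
          rw [ubGo_quote_cons rest q r hd]
          simp only [ih r hr]
          simp
      · by_cases hs : c = '/'
        · subst hs
          have hstep : uaStep (false, false, res) '/' = (false, true, res) := by
            simp [uaStep]
          rw [List.foldl_cons, hstep, ua_comment]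
          rcases hd : rest.dropWhile (· ≠ '\n') with _ | ⟨nl, r⟩
          · rw [ubGo_comment_nil rest hd]; simp
          · have hr : r.length ≤ n := by
              have h1 := List.length_dropWhile_le (fun x => decide (x ≠ '\n')) rest
              rw [hd] at h1; simp at h1; omega
            rw [ubGo_comment_cons rest nl r hd]
            simp only [ih r hr]
            simp
        · have hstep : uaStep (false, false, res) c = (false, false, res ++ [c]) := by
            simp [uaStep, hc, hs]
          rw [List.foldl_cons, hstep, ih rest hrest, ubGo_other c rest hc hs]
          simp

-- ===== VERDICT (by name: the statement is the Claim_ definition above) =====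
theorem uncommentkvfile_spec : Claim_equal_uncommentkvfile := by
  intro text _
  unfold Spec_uncommentkvfile uncommentkvfile uncommentkvfile_alt
  rw [ua_main_aux text.toList.length text.toList le_rfl]
  rfl
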